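-- pv_equiv track=rewrite | github.com/gusevskiy/algorithms | algorithms_practikum/lesson_yandex/line_search.py | shortword
-- ===== SOURCE A (Python) =====
-- def shortword(words):
--     """Найти dct самые короткие слова"""
--     minlen = len(words[0])
--     for word in words:  # проходимся находим минимальное слово
--         if len(word) < minlen:
--             minlen = len(word)
--     ans = []
--     for word in words:  # проходимся еще раз если длина слова = мин.
--         # добавляем все такие слова в список
--         if len(word) == minlen:
--             ans.append(word)
--     return ' '.join(ans)
-- ===== SOURCE B (Python) =====
-- def shortword(words):
--     """Найти dct самые короткие слова"""
--     # single backwards pass: seed from the last word, walk the rest right-to-left,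
--     # collecting ties (in reverse order) and restarting on a shorter word;
--     # one final reverse restores the original order
--     minlen, ans = len(words[-1]), [words[-1]]
--     for word in reversed(words[:-1]):
--         l = len(word)
--         if l < minlen:
--             minlen, ans = l, [word]
--         elif l == minlen:
--             ans.append(word)
--     return ' '.join(reversed(ans))
-- ===== Notes on version B (the rewrite author's own statement) =====
-- stated objective: alternative
-- what changed: Replaces A's two forward passes (find the minimum length, then collect matches) by one backwards right-to-left pass seeded from the last word: ties are appended (collected in reverse), the candidate list is reset on a shorter word, and one final reverse restores the original order.
import Mathlib
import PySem

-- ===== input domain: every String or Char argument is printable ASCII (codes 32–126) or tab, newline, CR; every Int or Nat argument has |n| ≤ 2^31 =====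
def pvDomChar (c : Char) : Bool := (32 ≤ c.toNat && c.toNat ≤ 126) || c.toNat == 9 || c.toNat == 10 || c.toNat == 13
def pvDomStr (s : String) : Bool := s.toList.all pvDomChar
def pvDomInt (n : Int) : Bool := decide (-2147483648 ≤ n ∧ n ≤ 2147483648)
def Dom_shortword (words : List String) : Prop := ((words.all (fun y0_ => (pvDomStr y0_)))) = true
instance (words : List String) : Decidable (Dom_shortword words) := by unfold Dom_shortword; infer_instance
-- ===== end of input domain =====

-- B replaces A's two forward passes (find min length, then collect) by one backwards pass
-- seeded from the last word, appending ties, resetting on a shorter word, reversing once at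
-- the end; same return value.

-- ===== PORT A =====
def shortword (words : List String) : String :=
  match words with
  | [] => ""  -- words[0] raises IndexError on the empty list; excluded by Pre_shortword
  | w0 :: _ =>
    let minlen := words.foldl (fun m w => if PySem.Str.len w < m then PySem.Str.len w else m)
      (PySem.Str.len w0)
    let ans := words.foldl (fun acc w => if PySem.Str.len w = minlen then acc ++ [w] else acc)
      ([] : List String)
    PySem.Str.join " " ans

-- ===== PORT B =====
def shortword_alt (words : List String) : String :=
  match PySem.List.pyGet? words (-1) with
  | none => ""  -- words[-1] raises IndexError on the empty list; excluded by Pre_shortword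
  | some wl =>
    let st := ((PySem.List.slice words none (some (-1))).reverse).foldl
      (fun (st : Int × List String) word =>
        let l := PySem.Str.len word
        if l < st.1 then (l, [word])
        else if l = st.1 then (st.1, st.2 ++ [word])
        else st)
      (PySem.Str.len wl, [wl])
    PySem.Str.join " " st.2.reverse

-- ===== PRECONDITION & SPEC =====
-- A (words[0]) and B (words[-1]) both raise IndexError on the empty list.
def Pre_shortword (words : List String) : Prop := words ≠ []
instance (words : List String) : Decidable (Pre_shortword words) := by unfold Pre_shortword; infer_instance
def pvWitness_shortword : List String := ["aa", "b", "cc", "d"]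

def Spec_shortword (words : List String) (out : String) : Prop := out = shortword_alt words
instance (words : List String) (out : String) : Decidable (Spec_shortword words out) := by unfold Spec_shortword; infer_instance

-- ===== CLAIM (what is proved, stated in full; the proofs are below) =====
def Claim_equal_shortword : Prop := ∀ (words : List String), Dom_shortword words → Pre_shortword words → Spec_shortword words (shortword words)

-- ===== LEMMAS AND PROOFS =====

-- min-fold in 'min' form; pvMin l = minimum word length of a (nonempty) list l
def pvMinF (m0 : Int) (ws : List String) : Int :=
  ws.foldl (fun m w => min m (w.length : Int)) m0

def pvMin : List String → Int
  | [] => 0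
  | v :: vs => pvMinF (v.length : Int) vs

theorem pvMinF_le (m0 : Int) (ws : List String) : pvMinF m0 ws ≤ m0 := by
  induction ws generalizing m0 with
  | nil => simp [pvMinF]
  | cons w ws ih =>
    simp only [pvMinF, List.foldl_cons]
    exact le_trans (ih _) (by omega)

theorem pvMinF_min (a b : Int) (ws : List String) :
    pvMinF (min a b) ws = min a (pvMinF b ws) := by
  induction ws generalizing b with
  | nil => simp [pvMinF]
  | cons w ws ih =>
    simp only [pvMinF, List.foldl_cons] at *
    have h : min (min a b) (w.length : Int) = min a (min b (w.length : Int)) := by omega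
    rw [h, ih]

theorem pvMinF_le_mem (m0 : Int) (ws : List String) (x : String) (hx : x ∈ ws) :
    pvMinF m0 ws ≤ (x.length : Int) := by
  induction ws generalizing m0 with
  | nil => cases hx
  | cons w ws ih =>
    simp only [pvMinF, List.foldl_cons]
    rcases List.mem_cons.mp hx with h | h
    · subst h
      exact le_trans (pvMinF_le _ _) (by omega)
    · exact ih _ h

theorem pvMin_cons (w : String) (t : List String) (ht : t ≠ []) :
    pvMin (w :: t) = min (w.length : Int) (pvMin t) := by
  match t with
  | [] => exact absurd rfl ht
  | u :: us =>
    show pvMinF (w.length : Int) (u :: us) = _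
    simp only [pvMinF, List.foldl_cons]
    exact pvMinF_min (w.length : Int) (u.length : Int) us

theorem pvMin_le_mem (t : List String) (x : String) (hx : x ∈ t) :
    pvMin t ≤ (x.length : Int) := by
  match t with
  | [] => cases hx
  | u :: us =>
    rcases List.mem_cons.mp hx with h | h
    · subst h; exact pvMinF_le _ _
    · exact pvMinF_le_mem _ _ _ h

-- A's first-pass fold equals pvMinF (if-vs-min)
theorem pvAfold_eq (m0 : Int) (ws : List String) :
    ws.foldl (fun m w => if (w.length : Int) < m then (w.length : Int) else m) m0
      = pvMinF m0 ws := by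
  induction ws generalizing m0 with
  | nil => simp [pvMinF]
  | cons w ws ih =>
    simp only [List.foldl_cons, pvMinF] at *
    have h : (if (w.length : Int) < m0 then (w.length : Int) else m0) = min m0 (w.length : Int) := by
      omega
    rw [h, ih]

-- B's backwards loop, in foldr form: appending a prefix keeps the state exact
theorem pvFoldrB (ps t : List String) (ht : t ≠ []) :
    ps.foldr
      (fun w (st : Int × List String) =>
        if (w.length : Int) < st.1 then ((w.length : Int), [w])
        else if (w.length : Int) = st.1 then (st.1, st.2 ++ [w])
        else st)
      (pvMin t, (t.filter (fun w => decide ((w.length : Int) = pvMin t))).reverse)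
    = (pvMin (ps ++ t), ((ps ++ t).filter (fun w => decide ((w.length : Int) = pvMin (ps ++ t)))).reverse) := by
  induction ps with
  | nil => rfl
  | cons w ps ih =>
    have hne : ps ++ t ≠ [] := by simp [ht]
    have hmc : pvMin (w :: (ps ++ t)) = min (w.length : Int) (pvMin (ps ++ t)) :=
      pvMin_cons w (ps ++ t) hne
    simp only [List.foldr_cons, ih, List.cons_append]
    by_cases h1 : (w.length : Int) < pvMin (ps ++ t)
    · rw [if_pos h1]
      have hm : pvMin (w :: (ps ++ t)) = (w.length : Int) := by omega
      simp only [hm]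
      have hfilp : List.filter (fun x => decide (x.length = w.length)) ps = [] := by
        rw [List.filter_eq_nil_iff]
        intro x hx
        have := pvMin_le_mem (ps ++ t) x (List.mem_append.mpr (Or.inl hx))
        simp only [decide_eq_true_eq]
        omega
      have hfilt : List.filter (fun x => decide (x.length = w.length)) t = [] := by
        rw [List.filter_eq_nil_iff]
        intro x hx
        have := pvMin_le_mem (ps ++ t) x (List.mem_append.mpr (Or.inr hx))
        simp only [decide_eq_true_eq]
        omega
      simp [hfilp, hfilt]
    · rw [if_neg h1]
      by_cases h2 : (w.length : Int) = pvMin (ps ++ t)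
      · rw [if_pos h2]
        have hm : pvMin (w :: (ps ++ t)) = pvMin (ps ++ t) := by omega
        simp [hm, h2]
      · rw [if_neg h2]
        have hm : pvMin (w :: (ps ++ t)) = pvMin (ps ++ t) := by omega
        simp [hm, h2]

-- ===== VERDICT (by name: the statement is the Claim_ definition above) =====
theorem shortword_spec : Claim_equal_shortword := by
  intro words _ hpre
  match hw : words with
  | [] => exact absurd rfl hpre
  | w0 :: rest =>
    have hne : w0 :: rest ≠ [] := by simp
    have hlast : ∃ wl, (w0 :: rest).getLast? = some wl := by
      cases h : (w0 :: rest).getLast? with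
      | none => exact absurd (List.getLast?_eq_none_iff.mp h) hne
      | some wl => exact ⟨wl, rfl⟩
    obtain ⟨wl, hwl⟩ := hlast
    obtain ⟨ys, hys⟩ := List.getLast?_eq_some_iff.mp hwl
    have hsplit : (w0 :: rest).dropLast ++ [wl] = w0 :: rest := by
      rw [hys, List.dropLast_concat]
    show shortword (w0 :: rest) = shortword_alt (w0 :: rest)
    simp only [shortword, shortword_alt, PySem.Str.len_eq, String.length_toList,
      PySem.List.pyGet?_neg_one, hwl, PySem.List.slice_to_neg_one, List.foldl_reverse]
    -- A side: min fold, then collect fold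
    rw [pvAfold_eq]
    have hA : pvMinF (w0.length : Int) (w0 :: rest) = pvMin (w0 :: rest) := by
      simp only [pvMinF, List.foldl_cons, pvMin]
      have : min (w0.length : Int) (w0.length : Int) = (w0.length : Int) := by omega
      rw [this]
    rw [hA, PySem.List.foldl_append_ite_eq_filter]
    -- B side: foldr over dropLast, seeded with the singleton [wl]
    have hinit : ((pvMin [wl]), (([wl].filter (fun w => decide ((w.length : Int) = pvMin [wl]))).reverse))
        = ((wl.length : Int), [wl]) := by
      simp [pvMin, pvMinF]
    have hB := pvFoldrB (w0 :: rest).dropLast [wl] (by simp)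
    rw [hinit] at hB
    rw [hsplit] at hB
    rw [hB]
    simp
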